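-- pv_equiv track=rewrite | github.com/kdt-fda/PJT_BOK_1 | modeling/debenture_page_model.py | sentence_highest_ngrams
-- ===== SOURCE A (Python) =====
-- from typing import List, Tuple, Dict, Optional
--
-- def sentence_highest_ngrams(tokens: List[str], n_max: int = 5) -> List[Tuple[str, ...]]:
--     L = len(tokens)
--     covered = [False] * L
--     selected: List[Tuple[str, ...]] = []
--
--     for n in range(n_max, 0, -1):
--         if L < n:
--             continue
--         for i in range(0, L - n + 1):
--             span = range(i, i + n)
--             if any(covered[j] for j in span):
--                 continue
--             ng = tuple(tokens[i:i+n])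
--             selected.append(ng)
--             for j in span:
--                 covered[j] = True
--     return selected
-- ===== SOURCE B (Python) =====
-- def sentence_highest_ngrams(tokens, n_max=5):
--     # The only uncovered region is always a suffix: track its length r instead of a coverage array.
--     L = len(tokens)
--     out = []
--     r = L
--     for n in range(n_max, 0, -1):
--         start = L - r
--         for k in range(r // n):
--             out.append(tuple(tokens[start + k * n:start + (k + 1) * n]))
--         r %= n
--     return out
-- ===== Notes on version B (the rewrite author's own statement) =====
-- stated objective: faster
-- what changed: B replaces the boolean coverage array and the per-position any(covered) window scans by arithmetic on the length r of the single uncovered suffix: each round emits r//n consecutive n-gram slices and sets r to r%n, eliminating the coverage array entirely.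
import Mathlib
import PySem

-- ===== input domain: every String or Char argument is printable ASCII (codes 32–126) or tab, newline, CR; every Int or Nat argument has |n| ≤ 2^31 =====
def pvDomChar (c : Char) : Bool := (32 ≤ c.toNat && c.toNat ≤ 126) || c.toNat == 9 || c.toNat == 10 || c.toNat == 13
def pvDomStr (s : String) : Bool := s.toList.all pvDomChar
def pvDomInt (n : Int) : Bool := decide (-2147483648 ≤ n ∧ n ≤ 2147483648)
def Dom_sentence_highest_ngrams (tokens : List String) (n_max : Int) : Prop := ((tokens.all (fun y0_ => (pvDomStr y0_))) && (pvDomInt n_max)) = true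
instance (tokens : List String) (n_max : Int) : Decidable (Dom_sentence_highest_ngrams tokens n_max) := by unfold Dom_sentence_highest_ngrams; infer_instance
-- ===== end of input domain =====

-- B replaces A's boolean coverage array and per-window any() scans by arithmetic on the
-- length of the single uncovered suffix (r//n slices per round, then r %= n); same output.

-- ===== PORT A =====
def sentence_highest_ngrams (tokens : List String) (n_max : Int) : List (List String) :=
  let L : Int := PySem.List.len tokens
  let res :=
    (PySem.List.pyRange n_max 0 (-1)).foldl
      (fun (st : List Bool × List (List String)) n =>
        if L < n then st
        else
          (PySem.List.pyRange 0 (L - n + 1) 1).foldl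
            (fun st i =>
              let span := PySem.List.pyRange i (i + n) 1
              if span.any (fun j => PySem.List.pyGetD st.1 j false) then st
              else
                let ng := PySem.List.slice tokens (some i) (some (i + n))
                (span.foldl (fun cov j => PySem.List.pySetD cov j true) st.1, st.2 ++ [ng]))
            st)
      (List.replicate L.toNat false, [])
  res.2

-- ===== PORT B =====
def sentence_highest_ngrams_alt (tokens : List String) (n_max : Int) : List (List String) :=
  let L : Int := PySem.List.len tokens
  let res :=
    (PySem.List.pyRange n_max 0 (-1)).foldl
      (fun (st : Int × List (List String)) n =>
        let start := L - st.1
        let out :=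
          (PySem.List.pyRange 0 (PySem.Int.floordiv st.1 n) 1).foldl
            (fun out k =>
              out ++ [PySem.List.slice tokens (some (start + k * n)) (some (start + (k + 1) * n))])
            st.2
        (PySem.Int.mod st.1 n, out))
      (L, [])
  res.2

-- ===== PRECONDITION & SPEC =====
def Spec_sentence_highest_ngrams (tokens : List String) (n_max : Int) (out : List (List String)) : Prop := out = sentence_highest_ngrams_alt tokens n_max
instance (tokens : List String) (n_max : Int) (out : List (List String)) : Decidable (Spec_sentence_highest_ngrams tokens n_max out) := by unfold Spec_sentence_highest_ngrams; infer_instance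

-- ===== CLAIM (what is proved, stated in full; the proofs are below) =====
def Claim_equal_sentence_highest_ngrams : Prop := ∀ (tokens : List String) (n_max : Int), Dom_sentence_highest_ngrams tokens n_max → Spec_sentence_highest_ngrams tokens n_max (sentence_highest_ngrams tokens n_max)

-- ===== LEMMAS AND PROOFS =====

-- covered array when the uncovered region is the suffix of length r
def pvCov (L r : Nat) : List Bool := List.replicate (L - r) true ++ List.replicate r false

-- the q consecutive n-gram slices starting at position c
def pvTiles (tokens : List String) (c n q : Nat) : List (List String) :=
  (List.range q).map (fun k => (tokens.drop (c + k * n)).take n)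

lemma pvTiles_zero (tokens : List String) (c n : Nat) : pvTiles tokens c n 0 = [] := rfl

lemma pvTiles_succ (tokens : List String) (c n q : Nat) :
    pvTiles tokens c n (q + 1) =
      (tokens.drop c).take n :: pvTiles tokens (c + n) n q := by
  simp only [pvTiles, List.range_succ_eq_map, List.map_cons, List.map_map]
  congr 1
  · simp
  · apply List.map_congr_left
    intro k _
    simp only [Function.comp_apply]
    congr 2
    simp [Nat.succ_eq_add_one, Nat.add_mul]
    ring

lemma pvCov_length (L r : Nat) (h : r ≤ L) : (pvCov L r).length = L := by
  simp [pvCov]; omega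

lemma pvCov_get (L r : Nat) (hr : r ≤ L) (j : Int) (h0 : 0 ≤ j) (hj : j < (L : Int)) :
    PySem.List.pyGetD (pvCov L r) j false = decide (j < (L : Int) - (r : Int)) := by
  rw [PySem.List.pyGetD_eq_getElem (pvCov L r) false h0 (by rw [pvCov_length L r hr]; exact hj)]
  by_cases hc : j.toNat < L - r
  · simp only [pvCov]
    rw [List.getElem_append_left (by simpa using hc)]
    simp [List.getElem_replicate]
    omega
  · simp only [pvCov]
    rw [List.getElem_append_right (by simp; omega)]
    simp [List.getElem_replicate]
    omega

-- marking the span [c, c+k) turns pvCov L (L - c) into pvCov L (L - c - k)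
lemma pvMark (L : Nat) : ∀ (k c : Nat), c + k ≤ L →
    (PySem.List.pyRange (c : Int) ((c : Int) + (k : Int)) 1).foldl
        (fun cov j => PySem.List.pySetD cov j true) (pvCov L (L - c))
      = pvCov L (L - (c + k)) := by
  intro k
  induction k with
  | zero => intro c h; simp [PySem.List.pyRange_one_eq_nil]
  | succ k ih =>
    intro c h
    rw [PySem.List.pyRange_one_cons (by omega)]
    simp only [List.foldl_cons]
    have hset : PySem.List.pySetD (pvCov L (L - c)) (c : Int) true = pvCov L (L - (c + 1)) := by
      rw [PySem.List.pySetD_natCast]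
      have hc : L - (L - c) = c := by omega
      have hr : L - c = (L - (c + 1)) + 1 := by omega
      rw [pvCov, hc, hr, List.replicate_succ]
      rw [List.set_append_right _ _ (by simp)]
      simp only [List.length_replicate, Nat.sub_self, List.set_cons_zero]
      rw [pvCov, show L - (L - (c + 1)) = c + 1 by omega, List.replicate_succ']
      simp
    rw [hset]
    have := ih (c + 1) (by omega)
    have harg : ((c : Int) + 1) = ((c + 1 : Nat) : Int) := by push_cast; ring
    have harg2 : ((c : Int) + ((k + 1 : Nat) : Int)) = (((c + 1) : Nat) : Int) + ((k : Nat) : Int) := by push_cast; ring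
    rw [harg2, harg, this]
    congr 1
    omega

-- A's inner scan over positions i0.. on a suffix-uncovered coverage array:
-- it emits exactly the ⌊r/n⌋ consecutive n-gram tiles and leaves r % n uncovered.
lemma pvInner (tokens : List String) (n : Int) (hn : 1 ≤ n) (hnL : n ≤ (tokens.length : Int)) :
    ∀ (m : Nat) (i0 : Int) (r : Nat) (sel : List (List String)),
      r ≤ tokens.length → 0 ≤ i0 → i0 ≤ (tokens.length : Int) - (r : Int) →
      ((tokens.length : Int) - n + 1 - i0).toNat = m →
      (PySem.List.pyRange i0 ((tokens.length : Int) - n + 1) 1).foldl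
          (fun (st : List Bool × List (List String)) i =>
            let span := PySem.List.pyRange i (i + n) 1
            if span.any (fun j => PySem.List.pyGetD st.1 j false) then st
            else
              let ng := PySem.List.slice tokens (some i) (some (i + n))
              (span.foldl (fun cov j => PySem.List.pySetD cov j true) st.1, st.2 ++ [ng]))
          (pvCov tokens.length r, sel)
        = (pvCov tokens.length (r % n.toNat),
           sel ++ pvTiles tokens (tokens.length - r) n.toNat (r / n.toNat)) := by
  intro m
  induction m with
  | zero =>
    intro i0 r sel hr h0 hle hfuel
    have hstop : (tokens.length : Int) - n + 1 ≤ i0 := by omega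
    rw [PySem.List.pyRange_one_eq_nil hstop]
    have hrn : r < n.toNat := by omega
    simp [List.foldl_nil, Nat.mod_eq_of_lt hrn, Nat.div_eq_of_lt hrn, pvTiles_zero]
  | succ m ih =>
    intro i0 r sel hr h0 hle hfuel
    have hlt : i0 < (tokens.length : Int) - n + 1 := by omega
    rw [PySem.List.pyRange_one_cons hlt]
    simp only [List.foldl_cons]
    by_cases hcase : i0 < (tokens.length : Int) - (r : Int)
    · -- skip: position i0 is covered
      have hany : (PySem.List.pyRange i0 (i0 + n) 1).any
          (fun j => PySem.List.pyGetD (pvCov tokens.length r) j false) = true := by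
        refine List.any_eq_true.2 ⟨i0, ?_, ?_⟩
        · exact (PySem.List.mem_pyRange_one).2 ⟨le_refl _, by omega⟩
        · rw [pvCov_get tokens.length r hr i0 h0 (by omega)]
          simp; omega
      simp only [hany, if_true]
      exact ih (i0 + 1) r sel hr (by omega) (by omega) (by omega)
    · -- emit at i0 = tokens.length - r
      have hi0 : i0 = (tokens.length : Int) - (r : Int) := by omega
      have hrn : n ≤ (r : Int) := by omega
      have hany : (PySem.List.pyRange i0 (i0 + n) 1).any
          (fun j => PySem.List.pyGetD (pvCov tokens.length r) j false) = false := by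
        refine List.any_eq_false.2 ?_
        intro j hj
        have hj' := (PySem.List.mem_pyRange_one).1 hj
        rw [pvCov_get tokens.length r hr j (by omega) (by omega)]
        simp; omega
      simp only [hany, Bool.false_eq_true, if_false]
      -- the emitted tile
      have hng : PySem.List.slice tokens (some i0) (some (i0 + n))
          = (tokens.drop (tokens.length - r)).take n.toNat := by
        have h1 : i0 = ((tokens.length - r : Nat) : Int) := by omega
        rw [h1, show ((tokens.length - r : Nat) : Int) + n
              = ((tokens.length - r : Nat) : Int) + ((n.toNat : Nat) : Int) by omega,
            PySem.List.slice_natCast_add]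
      -- the marking loop
      have hmark : (PySem.List.pyRange i0 (i0 + n) 1).foldl
          (fun cov j => PySem.List.pySetD cov j true) (pvCov tokens.length r)
          = pvCov tokens.length (r - n.toNat) := by
        have h1 : i0 = ((tokens.length - r : Nat) : Int) := by omega
        have hc : tokens.length - (tokens.length - r) = r := by omega
        have := pvMark tokens.length n.toNat (tokens.length - r) (by omega)
        rw [hc] at this
        rw [h1, show ((tokens.length - r : Nat) : Int) + n
              = ((tokens.length - r : Nat) : Int) + ((n.toNat : Nat) : Int) by omega,
            this]
        congr 1
        omega
      simp only [hng, hmark]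
      have hrec := ih (i0 + 1) (r - n.toNat) (sel ++ [(tokens.drop (tokens.length - r)).take n.toNat])
        (by omega) (by omega) (by omega) (by omega)
      rw [hrec]
      simp only [Prod.mk.injEq]
      constructor
      · congr 1
        conv_rhs => rw [show r = n.toNat + (r - n.toNat) by omega]
        rw [Nat.add_mod_left]
      · rw [List.append_assoc]
        congr 1
        have hdiv : r / n.toNat = (r - n.toNat) / n.toNat + 1 := by
          conv_lhs => rw [show r = (r - n.toNat) + n.toNat by omega]
          rw [Nat.add_div_right _ (by omega)]
        rw [hdiv, pvTiles_succ]
        simp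
        congr 2
        omega

-- named forms of the two outer-loop bodies (definitionally equal to the ports' lambdas)
def pvStepA (tokens : List String) (st : List Bool × List (List String)) (n : Int) :
    List Bool × List (List String) :=
  if (tokens.length : Int) < n then st
  else
    (PySem.List.pyRange 0 ((tokens.length : Int) - n + 1) 1).foldl
      (fun (st : List Bool × List (List String)) i =>
        let span := PySem.List.pyRange i (i + n) 1
        if span.any (fun j => PySem.List.pyGetD st.1 j false) then st
        else
          let ng := PySem.List.slice tokens (some i) (some (i + n))
          (span.foldl (fun cov j => PySem.List.pySetD cov j true) st.1, st.2 ++ [ng]))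
      st

def pvStepB (tokens : List String) (st : Int × List (List String)) (n : Int) :
    Int × List (List String) :=
  (PySem.Int.mod st.1 n,
   (PySem.List.pyRange 0 (PySem.Int.floordiv st.1 n) 1).foldl
     (fun out k =>
       out ++ [PySem.List.slice tokens (some ((tokens.length : Int) - st.1 + k * n))
                 (some ((tokens.length : Int) - st.1 + (k + 1) * n))])
     st.2)

lemma pvRoundA (tokens : List String) (n : Int) (hn : 1 ≤ n) (r : Nat) (sel : List (List String))
    (hr : r ≤ tokens.length) :
    pvStepA tokens (pvCov tokens.length r, sel) n
      = (pvCov tokens.length (r % n.toNat),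
         sel ++ pvTiles tokens (tokens.length - r) n.toNat (r / n.toNat)) := by
  unfold pvStepA
  by_cases hL : (tokens.length : Int) < n
  · rw [if_pos hL]
    have hrn : r < n.toNat := by omega
    simp [Nat.mod_eq_of_lt hrn, Nat.div_eq_of_lt hrn, pvTiles_zero]
  · rw [if_neg hL]
    exact pvInner tokens n hn (by omega) ((tokens.length : Int) - n + 1).toNat 0 r sel hr
      le_rfl (by omega) (by omega)

lemma pvRoundB (tokens : List String) (n : Int) (hn : 1 ≤ n) (r : Nat) (out : List (List String))
    (hr : r ≤ tokens.length) :
    pvStepB tokens ((r : Int), out) n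
      = (((r % n.toNat : Nat) : Int),
         out ++ pvTiles tokens (tokens.length - r) n.toNat (r / n.toNat)) := by
  obtain ⟨n', rfl⟩ : ∃ n' : Nat, n = (n' : Int) := ⟨n.toNat, by omega⟩
  unfold pvStepB
  simp only [PySem.Int.mod_natCast, PySem.Int.floordiv_natCast, Int.toNat_natCast]
  rw [PySem.List.foldl_append_singleton_eq_map]
  congr 1
  rw [PySem.List.pyRange_one]
  simp only [Int.sub_zero, Int.toNat_natCast, List.map_map]
  unfold pvTiles
  congr 1
  apply List.map_congr_left
  intro k hk
  simp only [Function.comp_apply, zero_add]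
  rw [show (tokens.length : Int) - (r : Int) + (k : Int) * (n' : Int)
        = ((tokens.length - r + k * n' : Nat) : Int) by push_cast [Nat.cast_sub hr]; ring,
      show (tokens.length : Int) - (r : Int) + ((k : Int) + 1) * (n' : Int)
        = ((tokens.length - r + k * n' : Nat) : Int) + ((n' : Nat) : Int) by
          push_cast [Nat.cast_sub hr]; ring,
      PySem.List.slice_natCast_add]

lemma pvOuter (tokens : List String) : ∀ (ns : List Int), (∀ x ∈ ns, 1 ≤ x) →
    ∀ (r : Nat) (sel : List (List String)), r ≤ tokens.length →
    (ns.foldl (pvStepA tokens) (pvCov tokens.length r, sel)).2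
      = (ns.foldl (pvStepB tokens) ((r : Int), sel)).2 := by
  intro ns
  induction ns with
  | nil => intro _ r sel _; rfl
  | cons n ns ih =>
    intro hmem r sel hr
    have hn : 1 ≤ n := hmem n (List.mem_cons_self)
    rw [List.foldl_cons, List.foldl_cons, pvRoundA tokens n hn r sel hr,
        pvRoundB tokens n hn r sel hr]
    exact ih (fun x hx => hmem x (List.mem_cons_of_mem _ hx))
      (r % n.toNat) (sel ++ pvTiles tokens (tokens.length - r) n.toNat (r / n.toNat))
      (le_trans (Nat.mod_le _ _) hr)

-- ===== VERDICT (by name: the statement is the Claim_ definition above) =====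
theorem sentence_highest_ngrams_spec : Claim_equal_sentence_highest_ngrams := by
  intro tokens n_max _
  show sentence_highest_ngrams tokens n_max = sentence_highest_ngrams_alt tokens n_max
  have h := pvOuter tokens (PySem.List.pyRange n_max 0 (-1))
    (fun x hx => by
      have := (PySem.List.mem_pyRange_neg_one).1 hx
      omega)
    tokens.length [] le_rfl
  have h0 : pvCov tokens.length tokens.length = List.replicate tokens.length false := by
    simp [pvCov]
  rw [h0] at h
  exact h
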